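-- pv_equiv track=rewrite | github.com/HaodongZou/badminton_count | app.py | _determine_winner_from_scores
-- ===== SOURCE A (Python) =====
-- def _determine_winner_from_scores(scores):
--     """根据比分判断胜负"""
--     my_wins = sum(1 for s in scores if s[0] > s[1])
--     opp_wins = sum(1 for s in scores if s[1] > s[0])
--     if my_wins > opp_wins:
--         return 'me'
--     elif opp_wins > my_wins:
--         return 'opponent'
--     else:
--         return 'draw'
-- ===== SOURCE B (Python) =====
-- def _determine_winner_from_scores(scores):
--     net = sum((a > b) - (a < b) for a, b in scores)
--     if net < 0:
--         return 'opponent'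
--     if net > 0:
--         return 'me'
--     return 'draw'
-- ===== Notes on version B (the rewrite author's own statement) =====
-- stated objective: simpler
-- what changed: Replaces the two separate win-counting passes and the count comparison with a single summation of per-match comparison signs (a>b)-(a<b), deciding by the sign of that one net total.
import Mathlib
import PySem

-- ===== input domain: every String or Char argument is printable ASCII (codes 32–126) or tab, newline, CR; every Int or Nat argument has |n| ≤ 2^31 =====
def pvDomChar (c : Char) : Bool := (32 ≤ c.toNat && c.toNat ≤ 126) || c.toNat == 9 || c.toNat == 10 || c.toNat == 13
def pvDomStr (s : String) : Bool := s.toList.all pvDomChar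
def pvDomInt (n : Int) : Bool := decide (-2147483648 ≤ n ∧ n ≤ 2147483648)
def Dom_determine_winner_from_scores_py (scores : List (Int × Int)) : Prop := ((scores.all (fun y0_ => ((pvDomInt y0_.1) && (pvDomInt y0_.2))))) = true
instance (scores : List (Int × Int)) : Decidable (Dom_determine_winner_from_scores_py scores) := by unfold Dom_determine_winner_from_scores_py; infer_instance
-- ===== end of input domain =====

-- ===== PORT A =====
-- B sums the per-match comparison signs (a>b)-(a<b) in one pass and decides by the sign of that single net total (simpler; same cost).
def determine_winner_from_scores_py (scores : List (Int × Int)) : String :=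
  let my_wins : Int := scores.foldl (fun acc s => if s.1 > s.2 then acc + 1 else acc) 0
  let opp_wins : Int := scores.foldl (fun acc s => if s.2 > s.1 then acc + 1 else acc) 0
  if my_wins > opp_wins then "me"
  else if opp_wins > my_wins then "opponent"
  else "draw"

-- ===== PORT B =====
def determine_winner_from_scores_py_alt (scores : List (Int × Int)) : String :=
  let net : Int :=
    (scores.map (fun p => (if p.1 > p.2 then (1 : Int) else 0) - (if p.1 < p.2 then 1 else 0))).sum
  if net < 0 then "opponent"
  else if net > 0 then "me"
  else "draw"

-- ===== PRECONDITION & SPEC =====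
def Spec_determine_winner_from_scores_py (scores : List (Int × Int)) (out : String) : Prop := out = determine_winner_from_scores_py_alt scores
instance (scores : List (Int × Int)) (out : String) : Decidable (Spec_determine_winner_from_scores_py scores out) := by unfold Spec_determine_winner_from_scores_py; infer_instance

-- ===== CLAIM (what is proved, stated in full; the proofs are below) =====
def Claim_equal_determine_winner_from_scores_py : Prop := ∀ (scores : List (Int × Int)), Dom_determine_winner_from_scores_py scores → Spec_determine_winner_from_scores_py scores (determine_winner_from_scores_py scores)

-- ===== LEMMAS AND PROOFS =====
lemma count_foldl_eq (p : Int × Int → Prop) [DecidablePred p] (l : List (Int × Int)) (a : Int) :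
    l.foldl (fun acc s => if p s then acc + 1 else acc) a = a + (l.countP (fun s => decide (p s)) : Int) := by
  induction l generalizing a with
  | nil => simp
  | cons h t ih =>
    simp only [List.foldl, List.countP_cons]
    by_cases hp : p h
    · rw [if_pos hp, ih]; simp [hp]; push_cast; ring
    · rw [if_neg hp, ih]; simp [hp]

lemma net_eq_counts (l : List (Int × Int)) :
    (l.map (fun p => (if p.1 > p.2 then (1 : Int) else 0) - (if p.1 < p.2 then 1 else 0))).sum
      = (l.countP (fun s => decide (s.1 > s.2)) : Int) - (l.countP (fun s => decide (s.2 > s.1)) : Int) := by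
  induction l with
  | nil => simp
  | cons h t ih =>
    simp only [List.map_cons, List.sum_cons, List.countP_cons, ih]
    rcases lt_trichotomy h.1 h.2 with hlt | heq | hgt
    · rw [if_neg (by omega : ¬ h.1 > h.2), if_pos hlt,
        if_neg (by simpa using (by omega : ¬ h.1 > h.2)),
        if_pos (by simpa using (hlt : h.2 > h.1))]
      push_cast; ring
    · rw [if_neg (by omega : ¬ h.1 > h.2), if_neg (by omega : ¬ h.1 < h.2),
        if_neg (by simpa using (by omega : ¬ h.1 > h.2)),
        if_neg (by simpa using (by omega : ¬ h.2 > h.1))]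
      push_cast; ring
    · rw [if_pos hgt, if_neg (by omega : ¬ h.1 < h.2),
        if_pos (by simpa using (hgt : h.1 > h.2)),
        if_neg (by simpa using (by omega : ¬ h.2 > h.1))]
      push_cast; ring

-- ===== VERDICT (by name: the statement is the Claim_ definition above) =====
theorem determine_winner_from_scores_py_spec : Claim_equal_determine_winner_from_scores_py := by
  intro scores _
  unfold Spec_determine_winner_from_scores_py
  simp only [determine_winner_from_scores_py, determine_winner_from_scores_py_alt,
    count_foldl_eq, net_eq_counts]
  split_ifs <;> first | rfl | omega
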